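-- pv_equiv track=rewrite | github.com/Sullivannichols/classes | csc211/hw/hw2/hw2.py | text_parser
-- ===== SOURCE A (Python) =====
-- import string
--
-- def text_parser(text):
--     """ This function parses the text for Alice by removing the Gutenberg
--     nonsense before and after the actual novel text and removing all punctuation.
--     """
--     punctuation = str.maketrans({key: None for key in string.punctuation})
--     text = text.split("THE END", 1)[0]
--     text = text.split("CHAPTER I", 1)[1]
--     text = text.replace('\n', ' ')
--     text = text.replace('-', ' ')
--     text = text.translate(punctuation)
--     return text
-- ===== SOURCE B (Python) =====
-- import string
--
-- def text_parser(text):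
--     """Same slicing as the original, then one fused pass over the characters
--     instead of two replace() scans plus a translate() scan."""
--     text = text.split("THE END", 1)[0]
--     text = text.split("CHAPTER I", 1)[1]
--     out = []
--     for c in text:
--         if c in '\n-':
--             out.append(' ')
--         elif c not in string.punctuation:
--             out.append(c)
--     return ''.join(out)
-- ===== Notes on version B (the rewrite author's own statement) =====
-- stated objective: simpler
-- what changed: After the same two boilerplate splits, B replaces the two replace() scans plus the translate() scan with one fused pass over the characters (space for '\n'/'-', drop punctuation, keep the rest).
import Mathlib
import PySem

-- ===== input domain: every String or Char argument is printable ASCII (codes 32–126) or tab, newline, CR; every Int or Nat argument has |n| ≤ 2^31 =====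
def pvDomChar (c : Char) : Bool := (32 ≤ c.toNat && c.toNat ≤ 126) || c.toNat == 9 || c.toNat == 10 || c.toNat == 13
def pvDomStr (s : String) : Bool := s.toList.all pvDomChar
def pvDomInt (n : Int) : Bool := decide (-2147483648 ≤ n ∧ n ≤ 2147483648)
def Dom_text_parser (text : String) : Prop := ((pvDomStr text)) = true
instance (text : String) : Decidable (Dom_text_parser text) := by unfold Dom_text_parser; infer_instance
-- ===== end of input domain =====

-- B fuses the two replace() scans and the translate() scan into one pass over the characters (objective: simpler, one traversal instead of three).

-- string.punctuation
def pvPunct : List Char := "!\"#$%&'()*+,-./:;<=>?@[\\]^_`{|}~".toList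

-- ===== PORT A =====
def text_parser (text : String) : String :=
  -- text.split("THE END", 1)[0]
  let t1 := (PySem.List.pyGet? ((PySem.Str.splitMax? text "THE END" 1).getD []) 0).getD ""
  -- text.split("CHAPTER I", 1)[1]  (IndexError when absent: excluded by Pre_)
  let t2 := (PySem.List.pyGet? ((PySem.Str.splitMax? t1 "CHAPTER I" 1).getD []) 1).getD ""
  let t3 := PySem.Str.replace t2 "\n" " "
  let t4 := PySem.Str.replace t3 "-" " "
  -- text.translate(maketrans({punct: None})) = delete punctuation chars (hand port, exact)
  String.ofList (t4.toList.filter (fun c => !(pvPunct.contains c)))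

-- ===== PORT B =====
-- the fused single pass of Source B
def pvFused : List Char → List Char
  | [] => []
  | c :: t =>
    if c ∈ ['\n', '-'] then ' ' :: pvFused t
    else if c ∈ pvPunct then pvFused t
    else c :: pvFused t

def text_parser_alt (text : String) : String :=
  let t1 := (PySem.List.pyGet? ((PySem.Str.splitMax? text "THE END" 1).getD []) 0).getD ""
  let t2 := (PySem.List.pyGet? ((PySem.Str.splitMax? t1 "CHAPTER I" 1).getD []) 1).getD ""
  String.ofList (pvFused t2.toList)

-- ===== PRECONDITION & SPEC =====
-- Pre_ excludes exactly the inputs where A raises IndexError: "CHAPTER I" does not occur in the part of text before the first "THE END" (B raises there too).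
def Pre_text_parser (text : String) : Prop :=
  PySem.Str.find text "CHAPTER I" ≠ -1 ∧
  (PySem.Str.find text "THE END" = -1 ∨
   PySem.Str.find text "CHAPTER I" + 9 ≤ PySem.Str.find text "THE END")
instance (text : String) : Decidable (Pre_text_parser text) := by unfold Pre_text_parser; infer_instance
def pvWitness_text_parser : String := "gutenberg CHAPTER I Alice, was bored!\nTHE END junk"

def Spec_text_parser (text : String) (out : String) : Prop := out = text_parser_alt text
instance (text : String) (out : String) : Decidable (Spec_text_parser text out) := by unfold Spec_text_parser; infer_instance

-- ===== CLAIM (what is proved, stated in full; the proofs are below) =====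
def Claim_equal_text_parser : Prop := ∀ (text : String), Dom_text_parser text → Pre_text_parser text → Spec_text_parser text (text_parser text)

-- ===== LEMMAS AND PROOFS =====

-- replace with a single-char pattern is a character map
lemma pv_replace_go_single (a b : Char) :
    ∀ (fuel : Nat) (l acc : List Char), l.length ≤ fuel →
      PySem.Chars.replace.go [a] [b] fuel l acc
        = acc.reverse ++ l.map (fun c => if c = a then b else c) := by
  intro fuel
  induction fuel with
  | zero =>
    intro l acc h
    have : l = [] := List.eq_nil_of_length_eq_zero (Nat.le_zero.mp h)
    subst this
    simp [PySem.Chars.replace.go]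
  | succ n ih =>
    intro l acc h
    cases l with
    | nil => simp [PySem.Chars.replace.go]
    | cons c t =>
      by_cases hc : c = a
      · subst hc
        have hp : List.isPrefixOf [c] (c :: t) = true := by
          simp [List.isPrefixOf]
        rw [PySem.Chars.replace.go]
        simp only [hp, if_true, List.length_cons, List.length_nil, List.drop_succ_cons,
          List.drop_zero, List.map_cons]
        rw [ih t ([b].reverse ++ acc) (by simpa using Nat.le_of_succ_le_succ h)]
        simp
      · have hp : List.isPrefixOf [a] (c :: t) = false := by
          simp [List.isPrefixOf]
          intro hh; exact absurd hh.symm hc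
        rw [PySem.Chars.replace.go]
        simp only [hp, Bool.false_eq_true, if_false]
        rw [ih t (c :: acc) (by simpa using Nat.le_of_succ_le_succ h)]
        simp [hc]

lemma pv_replace_single (a b : Char) (cs : List Char) :
    PySem.Chars.replace cs [a] [b] = cs.map (fun c => if c = a then b else c) := by
  rw [PySem.Chars.replace]
  simp only [List.isEmpty_cons, if_neg (by decide : ¬ (false = true))]
  simpa using pv_replace_go_single a b cs.length cs [] le_rfl

-- the fused pass equals map-map-filter
lemma pv_fused_eq (cs : List Char) :
    ((cs.map (fun c => if c = '\n' then ' ' else c)).map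
        (fun c => if c = '-' then ' ' else c)).filter (fun c => !(pvPunct.contains c))
      = pvFused cs := by
  induction cs with
  | nil => rfl
  | cons c t ih =>
    rw [List.map_cons, List.map_cons, List.filter_cons]
    by_cases h1 : c = '\n'
    · subst h1
      rw [if_pos (by decide)]
      rw [show pvFused ('\n' :: t) = ' ' :: pvFused t from by
        simp only [pvFused]; rw [if_pos (by decide)]]
      exact congrArg _ ih
    · by_cases h2 : c = '-'
      · subst h2
        rw [if_pos (by decide)]
        rw [show pvFused ('-' :: t) = ' ' :: pvFused t from by
          simp only [pvFused]; rw [if_pos (by decide)]]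
        exact congrArg _ ih
      · have hf1 : (if c = '\n' then ' ' else c) = c := if_neg h1
        have hf2 : (if c = '-' then ' ' else c) = c := if_neg h2
        by_cases h3 : c ∈ pvPunct
        · rw [if_neg (by simp [hf1, hf2, h3])]
          rw [show pvFused (c :: t) = pvFused t from by
            simp only [pvFused]; rw [if_neg (by simp [h1, h2]), if_pos h3]]
          exact ih
        · rw [if_pos (by simp [hf1, hf2, h3])]
          rw [show pvFused (c :: t) = c :: pvFused t from by
            simp only [pvFused]; rw [if_neg (by simp [h1, h2]), if_neg h3]]
          simp only [hf1, hf2]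
          exact congrArg _ ih

-- ===== VERDICT (by name: the statement is the Claim_ definition above) =====
-- the post-slicing pipelines agree on any string
lemma pv_tail_eq (u : String) :
    String.ofList
      (((PySem.Str.replace (PySem.Str.replace u "\n" " ") "-" " ").toList).filter
        (fun c => !(pvPunct.contains c)))
      = String.ofList (pvFused u.toList) := by
  refine congrArg String.ofList ?_
  have e1 : ("\n" : String).toList = ['\n'] := rfl
  have e2 : ("-" : String).toList = ['-'] := rfl
  have e3 : (" " : String).toList = [' '] := rfl
  rw [PySem.Str.toList_replace, PySem.Str.toList_replace, e1, e2, e3,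
    pv_replace_single, pv_replace_single]
  exact pv_fused_eq _

theorem text_parser_spec : Claim_equal_text_parser := by
  intro text _ _
  show text_parser text = text_parser_alt text
  unfold text_parser text_parser_alt
  exact pv_tail_eq _
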